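-- pv_equiv track=rewrite | github.com/serotonins/ctpo | src/programmers/138475_억억단을_외우자/jh_억억단을_외우자.py | solution
-- ===== SOURCE A (Python) =====
-- def solution(e, starts):
--     answer = []
--
--     div_cnt = [0]*(e+1)
--     for i in range(1,e+1):
--         for j in range(i,e+1,i):
--             div_cnt[j] += 1
--
--     temp = [0]*(e+1)
--     max_cnt = 0
--     max_value = 0
--     for s in range(e,0,-1):
--         if max_cnt <= div_cnt[s]:
--             max_cnt = div_cnt[s]
--             max_value = s
--         temp[s] = max_value
--
--     for s in starts:
--         answer.append(temp[s])
--
--     return answer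
-- ===== SOURCE B (Python) =====
-- def solution(e, starts):
--     # Divisor counts via the divisor-pair sieve: every divisor pair (i, q), i <= q,
--     # of a number j = i*q <= e is enumerated once, contributing 2 (or 1 when i == q).
--     n = e + 1
--     d = [0] * n
--     i = 1
--     while i * i <= e:
--         d[i * i] += 1
--         for q in range(i + 1, e // i + 1):
--             d[i * q] += 2
--         i += 1
--     # Suffix pass (same <=-tie-break toward smaller index), building the list
--     # of answers back-to-front instead of assigning into a preallocated array.
--     suf = []
--     bc = 0
--     bv = 0
--     for s in range(e, 0, -1):
--         if bc <= d[s]: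
--             bc = d[s]
--             bv = s
--         suf.append(bv)
--     temp = [0] + suf[::-1]
--     return [temp[s] for s in starts]
-- ===== Notes on version B (the rewrite author's own statement) =====
-- stated objective: faster
-- what changed: Replaces the harmonic multiples sieve (for each i, bump every multiple of i) by a divisor-pair sieve that enumerates each pair i<=q with i*q<=e once, adding 2 (or 1 on squares) -- about half the scatter iterations -- and builds the suffix-argmax table back-to-front as a list instead of assigning into a preallocated array.
import Mathlib
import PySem

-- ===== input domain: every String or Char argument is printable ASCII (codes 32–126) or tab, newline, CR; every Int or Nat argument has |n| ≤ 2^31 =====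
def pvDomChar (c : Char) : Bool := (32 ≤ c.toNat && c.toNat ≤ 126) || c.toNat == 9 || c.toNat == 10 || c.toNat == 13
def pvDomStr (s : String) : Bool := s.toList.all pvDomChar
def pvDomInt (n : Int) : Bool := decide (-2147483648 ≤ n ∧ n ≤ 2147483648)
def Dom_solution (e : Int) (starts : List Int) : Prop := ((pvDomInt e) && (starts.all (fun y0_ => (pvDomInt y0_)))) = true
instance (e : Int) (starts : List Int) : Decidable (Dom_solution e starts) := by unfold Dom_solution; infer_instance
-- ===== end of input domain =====

-- B replaces A's harmonic multiples sieve by a divisor-pair sieve (each pair i ≤ q with i*q ≤ e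
-- counted once, weight 2, weight 1 on squares) and builds the suffix-argmax table back-to-front.

-- ===== PORT A =====
def solution (e : Int) (starts : List Int) : List Int :=
  -- div_cnt = [0]*(e+1); for i in range(1,e+1): for j in range(i,e+1,i): div_cnt[j] += 1
  let dc : List Int :=
    (PySem.List.pyRange 1 (e+1) 1).foldl
      (fun dc i =>
        (PySem.List.pyRange i (e+1) i).foldl
          (fun dc j => PySem.List.pySetD dc j (PySem.List.pyGetD dc j 0 + 1)) dc)
      (List.replicate (e+1).toNat 0)
  -- temp = [0]*(e+1); max_cnt = 0; max_value = 0; for s in range(e,0,-1): …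
  let st : List Int × Int × Int :=
    (PySem.List.pyRange e 0 (-1)).foldl
      (fun st s =>
        let mcv := if st.2.1 ≤ PySem.List.pyGetD dc s 0
                   then (PySem.List.pyGetD dc s 0, s) else (st.2.1, st.2.2)
        (PySem.List.pySetD st.1 s mcv.2, mcv.1, mcv.2))
      (List.replicate (e+1).toNat 0, 0, 0)
  -- for s in starts: answer.append(temp[s])
  starts.foldl (fun ans s => ans ++ [PySem.List.pyGetD st.1 s 0]) []

-- ===== PORT B =====
-- while i*i <= e: d[i*i] += 1; for q in range(i+1, e//i+1): d[i*q] += 2; i += 1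
def bSieve (e : Int) (i : Int) (d : List Int) : List Int :=
  if h : i * i ≤ e then
    bSieve e (i+1)
      ((PySem.List.pyRange (i+1) (PySem.Int.floordiv e i + 1) 1).foldl
        (fun d q => PySem.List.pySetD d (i*q) (PySem.List.pyGetD d (i*q) 0 + 2))
        (PySem.List.pySetD d (i*i) (PySem.List.pyGetD d (i*i) 0 + 1)))
  else d
termination_by (e + 1 - i).toNat
decreasing_by
  have hii : i ≤ i * i := by nlinarith [sq_nonneg i, sq_nonneg (i - 1)]
  omega

def solution_alt (e : Int) (starts : List Int) : List Int :=
  let d := bSieve e 1 (List.replicate (e+1).toNat 0)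
  -- suf = []; bc = bv = 0; for s in range(e,0,-1): …; suf.append(bv)
  let st : List Int × Int × Int :=
    (PySem.List.pyRange e 0 (-1)).foldl
      (fun st s =>
        let cv := if st.2.1 ≤ PySem.List.pyGetD d s 0
                  then (PySem.List.pyGetD d s 0, s) else (st.2.1, st.2.2)
        (st.1 ++ [cv.2], cv.1, cv.2))
      ([], 0, 0)
  -- temp = [0] + suf[::-1]; return [temp[s] for s in starts]
  let temp := 0 :: st.1.reverse
  starts.map (fun s => PySem.List.pyGetD temp s 0)

-- ===== PRECONDITION & SPEC =====
-- Pre_ excludes exactly the inputs where A raises IndexError: some start index s is outside the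
-- valid Python index range -(e+1) ≤ s ≤ e of the table of length e+1.
def Pre_solution (e : Int) (starts : List Int) : Prop :=
  ∀ s ∈ starts, -(e+1) ≤ s ∧ s ≤ e
instance (e : Int) (starts : List Int) : Decidable (Pre_solution e starts) := by
  unfold Pre_solution; infer_instance
def pvWitness_solution : Int × List Int := (6, [1, 3, 6])

def Spec_solution (e : Int) (starts : List Int) (out : List Int) : Prop := out = solution_alt e starts
instance (e : Int) (starts : List Int) (out : List Int) : Decidable (Spec_solution e starts out) := by unfold Spec_solution; infer_instance

-- ===== CLAIM (what is proved, stated in full; the proofs are below) =====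
def Claim_equal_solution : Prop := ∀ (e : Int) (starts : List Int), Dom_solution e starts → Pre_solution e starts → Spec_solution e starts (solution e starts)

-- ===== LEMMAS AND PROOFS =====

theorem pvLenScatter (js : List Int) (w : Int) (d : List Int) :
    (js.foldl (fun d j => PySem.List.pySetD d j (PySem.List.pyGetD d j 0 + w)) d).length = d.length := by
  induction js generalizing d with
  | nil => rfl
  | cons j js ih => simp [List.foldl_cons, ih, PySem.List.length_pySetD]

theorem pvGetScatter (js : List Int) (w : Int) (d : List Int) (k : Nat)
    (hjs : ∀ j ∈ js, 0 ≤ j ∧ j < (d.length : Int)) :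
    (js.foldl (fun d j => PySem.List.pySetD d j (PySem.List.pyGetD d j 0 + w)) d).getD k 0
      = d.getD k 0 + w * (js.count (k : Int)) := by
  induction js generalizing d with
  | nil => simp
  | cons j js ih =>
    obtain ⟨h0, hl⟩ := hjs j (List.mem_cons_self ..)
    rw [List.foldl_cons, PySem.List.pySetD_of_nonneg _ _ h0, PySem.List.pyGetD_of_nonneg _ _ h0]
    rw [ih _ (by intro x hx; simpa using hjs x (List.mem_cons_of_mem _ hx))]
    rw [List.count_cons]
    have hjn : j.toNat < d.length := by omega
    by_cases hk : k = j.toNat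
    · subst hk
      have : ((j.toNat : Int) = j) := by omega
      simp [List.getD_eq_getElem?_getD, hjn, this]
      ring
    · have : ¬ ((k : Int) = j) := by omega
      simp [List.getD_eq_getElem?_getD, List.getElem?_set_ne (by omega : j.toNat ≠ k)]
      have h2 : ¬ (j = (k:Int)) := by omega
      simp [h2]
-- count of x in a positive-step pyRange
theorem pvCountPyRange (a b s x : Int) (hs : 0 < s) :
    (PySem.List.pyRange a b s).count x = if a ≤ x ∧ x < b ∧ s ∣ x - a then 1 else 0 := by
  have hn : (PySem.List.pyRange a b s).Nodup := by
    rw [PySem.List.pyRange_of_pos a b hs]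
    refine List.Nodup.map ?_ (List.nodup_range)
    intro u v huv
    simp only at huv
    have h1 : s * (u:Int) = s * v := by omega
    have := mul_left_cancel₀ (by omega : (s:Int) ≠ 0) h1
    omega
  rw [List.Nodup.count hn]
  simp only [PySem.List.mem_pyRange_iff_of_pos hs]

theorem pvAOuter (e : Int) (is : List Int) (k : Nat) :
    ∀ d : List Int, (∀ i ∈ is, 0 < i) → (e + 1 ≤ (d.length : Int)) →
    (is.foldl (fun d i =>
        (PySem.List.pyRange i (e+1) i).foldl
          (fun d j => PySem.List.pySetD d j (PySem.List.pyGetD d j 0 + 1)) d) d).getD k 0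
      = d.getD k 0 + (is.countP (fun i => decide (i ≤ (k:Int) ∧ (k:Int) < e+1 ∧ i ∣ (k:Int)))) := by
  induction is with
  | nil => simp
  | cons i is ih =>
    intro d hpos hlen
    have hi : 0 < i := hpos i (List.mem_cons_self ..)
    rw [List.foldl_cons]
    rw [ih _ (fun x hx => hpos x (List.mem_cons_of_mem _ hx))
        (by rwa [pvLenScatter])]
    rw [pvGetScatter _ _ _ _ (by
      intro j hj
      rw [PySem.List.mem_pyRange_iff_of_pos hi] at hj
      constructor <;> omega)]
    rw [pvCountPyRange _ _ _ _ hi]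
    have hdvd : (i ∣ (k:Int) - i) ↔ i ∣ (k:Int) := by
      constructor
      · intro h; simpa using h.add (dvd_refl i)
      · intro h; exact h.sub (dvd_refl i)
    rw [List.countP_cons]
    by_cases hc : i ≤ (k:Int) ∧ (k:Int) < e+1 ∧ i ∣ (k:Int)
    · have : (i ≤ (k:Int) ∧ (k:Int) < e + 1 ∧ i ∣ (k:Int) - i) := ⟨hc.1, hc.2.1, hdvd.mpr hc.2.2⟩
      simp
      ring
    · have : ¬ (i ≤ (k:Int) ∧ (k:Int) < e + 1 ∧ i ∣ (k:Int) - i) := by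
        intro h; exact hc ⟨h.1, h.2.1, hdvd.mp h.2.2⟩
      simp
      ring
theorem pvCountPRange (n : Nat) (q : Nat → Bool) :
    List.countP q (List.range n) = ((Finset.range n).filter (fun j => q j)).card := by
  simp only [Finset.filter, Finset.range, Multiset.range, Finset.card]
  simp only [Multiset.filter_coe, Multiset.coe_card]
  rw [List.countP_eq_length_filter]
  simp

theorem pvACount (e : Int) (k : Nat) (hk : (k:Int) ≤ e) :
    (List.countP (fun i => decide (i ≤ (k:Int) ∧ (k:Int) < e+1 ∧ i ∣ (k:Int)))
      (PySem.List.pyRange 1 (e+1) 1)) = ((Finset.Icc 1 (k:Int)).filter (fun m => m ∣ (k:Int))).card := by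
  rw [PySem.List.pyRange_one, List.countP_map]
  simp only [Function.comp_def]
  rw [pvCountPRange]
  refine Finset.card_nbij' (fun j => 1 + (j:Int)) (fun m => (m - 1).toNat) ?_ ?_ ?_ ?_
  · intro j hj
    simp only [Finset.coe_filter, Finset.mem_range, Set.mem_setOf_eq] at hj
    obtain ⟨_, hj2⟩ := hj
    have h3 := of_decide_eq_true hj2
    simp only [Finset.coe_filter, Finset.mem_Icc, Set.mem_setOf_eq]
    exact ⟨⟨by omega, h3.1⟩, h3.2.2⟩
  · intro m hm
    simp only [Finset.coe_filter, Finset.mem_Icc, Set.mem_setOf_eq] at hm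
    obtain ⟨⟨hm1, hmk⟩, hmd⟩ := hm
    simp only [Finset.coe_filter, Finset.mem_range, Set.mem_setOf_eq]
    constructor
    · omega
    · have h1 : 1 + (((m-1).toNat : Nat) : Int) = m := by omega
      rw [h1]
      exact decide_eq_true_eq.mpr ⟨hmk, by omega, hmd⟩
  · intro j hj
    simp only
    omega
  · intro m hm
    simp only [Finset.coe_filter, Finset.mem_Icc, Set.mem_setOf_eq] at hm
    simp only
    omega

theorem pvAEntry (e : Int) (k : Nat) (hk : (k:Int) ≤ e) :
    ((PySem.List.pyRange 1 (e+1) 1).foldl (fun d i =>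
        (PySem.List.pyRange i (e+1) i).foldl
          (fun d j => PySem.List.pySetD d j (PySem.List.pyGetD d j 0 + 1)) d)
      (List.replicate (e+1).toNat 0)).getD k 0 = (((Finset.Icc 1 (k:Int)).filter (fun m => m ∣ (k:Int))).card : Int) := by
  rw [pvAOuter e _ k _ (by intro i hi; rw [PySem.List.mem_pyRange_one] at hi; omega)
      (by simp)]
  have h0 : (List.replicate (e+1).toNat (0:Int)).getD k 0 = 0 := List.getD_replicate _ (by omega)
  rw [h0, pvACount e k hk]
  omega


-- count of x in the image of a unit-step range under multiplication by i > 0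
theorem pvCountMul (i a b x : Int) (hi : 0 < i) :
    ((PySem.List.pyRange a b 1).map (fun q => i * q)).count x
      = if i ∣ x ∧ a * i ≤ x ∧ x < b * i then 1 else 0 := by
  have hn : ((PySem.List.pyRange a b 1).map (fun q => i * q)).Nodup := by
    refine List.Nodup.map ?_ (PySem.List.nodup_pyRange_one a b)
    intro u v huv
    simp only at huv
    exact mul_left_cancel₀ (by omega) huv
  rw [List.Nodup.count hn]
  congr 1
  simp only [List.mem_map, PySem.List.mem_pyRange_one, eq_iff_iff]
  constructor
  · rintro ⟨q, ⟨hq1, hq2⟩, rfl⟩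
    refine ⟨Dvd.intro _ rfl, ?_, ?_⟩
    · have := mul_le_mul_of_nonneg_left hq1 (le_of_lt hi); nlinarith
    · nlinarith
  · rintro ⟨⟨t, rfl⟩, h1, h2⟩
    refine ⟨t, ⟨?_, ?_⟩, rfl⟩
    · nlinarith
    · nlinarith

theorem pvFilterStep (i k : Int) (p : Int → Prop) [DecidablePred p] (hik : i ≤ k) :
    ((Finset.Icc i k).filter p).card
      = ((Finset.Icc (i+1) k).filter p).card + if p i then 1 else 0 := by
  have h : Finset.Icc i k = insert i (Finset.Icc (i+1) k) := by
    ext x; simp only [Finset.mem_Icc, Finset.mem_insert]; omega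
  rw [h, Finset.filter_insert]
  split_ifs with hp
  · rw [Finset.card_insert_of_notMem (by simp [Finset.mem_filter, Finset.mem_Icc])]
  · rfl

theorem pvFilterIccEmpty (i k : Int) (p : Int → Prop) [DecidablePred p] (hik : k < i) :
    ((Finset.Icc i k).filter p).card = 0 := by
  rw [Finset.Icc_eq_empty (by omega), Finset.filter_empty, Finset.card_empty]

theorem pvBEntry (e : Int) (k : Nat) (hk : (k:Int) ≤ e) :
    ∀ (n : Nat) (i : Int) (d : List Int), 1 ≤ i → n = (e + 1 - i).toNat → e + 1 ≤ (d.length:Int) →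
    (bSieve e i d).getD k 0 = d.getD k 0
      + 2 * (((Finset.Icc i (k:Int)).filter (fun m => m ∣ (k:Int) ∧ m*m < (k:Int))).card : Int)
      + (((Finset.Icc i (k:Int)).filter (fun m => m*m = (k:Int))).card : Int) := by
  intro n
  induction n with
  | zero =>
    intro i d hi hn hlen
    have hie : e < i := by omega
    have hg : ¬ (i * i ≤ e) := by nlinarith
    rw [bSieve, dif_neg hg]
    rw [pvFilterIccEmpty _ _ _ (by omega), pvFilterIccEmpty _ _ _ (by omega)]
    simp
  | succ n ih =>
    intro i d hi hn hlen
    by_cases hg : i * i ≤ e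
    · rw [bSieve, dif_pos hg]
      have hie : i ≤ e := le_trans (by nlinarith) hg
      -- the updated array after iteration i
      set d1 := PySem.List.pySetD d (i*i) (PySem.List.pyGetD d (i*i) 0 + 1) with hd1
      have hlen1 : (d1.length : Int) = d.length := by rw [hd1, PySem.List.length_pySetD]
      have hmapfold :
          (PySem.List.pyRange (i+1) (PySem.Int.floordiv e i + 1) 1).foldl
            (fun d q => PySem.List.pySetD d (i*q) (PySem.List.pyGetD d (i*q) 0 + 2)) d1
          = ((PySem.List.pyRange (i+1) (PySem.Int.floordiv e i + 1) 1).map (fun q => i*q)).foldl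
            (fun d j => PySem.List.pySetD d j (PySem.List.pyGetD d j 0 + 2)) d1 := by
        rw [List.foldl_map]
      rw [hmapfold]
      set d2 := ((PySem.List.pyRange (i+1) (PySem.Int.floordiv e i + 1) 1).map (fun q => i*q)).foldl
            (fun d j => PySem.List.pySetD d j (PySem.List.pyGetD d j 0 + 2)) d1 with hd2
      have hlen2 : (d2.length : Int) = d.length := by rw [hd2, pvLenScatter, hlen1]
      rw [ih (i+1) d2 (by omega) (by omega) (by omega)]
      -- entry of d2 at k
      have hbound : ∀ j ∈ (PySem.List.pyRange (i+1) (PySem.Int.floordiv e i + 1) 1).map (fun q => i*q),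
          0 ≤ j ∧ j < (d1.length : Int) := by
        intro j hj
        simp only [List.mem_map, PySem.List.mem_pyRange_one] at hj
        obtain ⟨q, ⟨hq1, hq2⟩, rfl⟩ := hj
        have hqe : q * i ≤ e := by
          have := (PySem.Int.le_floordiv_iff_mul_le (by omega : (0:Int) < i)).mp (by omega : q ≤ PySem.Int.floordiv e i)
          exact this
        constructor
        · nlinarith
        · rw [hlen1]; nlinarith
      have hgd2 : d2.getD k 0 = d1.getD k 0 + 2 * (((PySem.List.pyRange (i+1) (PySem.Int.floordiv e i + 1) 1).map (fun q => i*q)).count (k:Int)) := by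
        rw [hd2, pvGetScatter _ _ _ _ hbound]
      have hgd1 : d1.getD k 0 = d.getD k 0 + (if (i*i : Int) = (k:Int) then 1 else 0) := by
        rw [hd1, PySem.List.pySetD_of_nonneg _ _ (by nlinarith : (0:Int) ≤ i*i),
            PySem.List.pyGetD_of_nonneg _ _ (by nlinarith : (0:Int) ≤ i*i)]
        have hnn : (0:Int) ≤ i*i := by positivity
        by_cases hq : (i*i).toNat = k
        · have hkk : (i*i : Int) = (k:Int) := by omega
          have hlt : k < d.length := by omega
          simp [List.getD_eq_getElem?_getD, hlt, hkk]
        · have hkk : ¬ ((i*i : Int) = (k:Int)) := by omega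
          simp [List.getD_eq_getElem?_getD, List.getElem?_set_ne (by omega : (i*i).toNat ≠ k), hkk]
      rw [hgd2, hgd1, pvCountMul _ _ _ _ (by omega : (0:Int) < i)]
      -- step the two finset filters from i to i+1
      have hik : i ≤ (k:Int) ∨ (k:Int) < i := by omega
      rcases hik with hik | hik
      · rw [pvFilterStep i (k:Int) _ hik, pvFilterStep i (k:Int) _ hik]
        -- identify the indicator terms
        have hsq : (if ((i:Int)*i = (k:Int)) then (1:Int) else 0) = (if (i*i : Int) = (k:Int) then 1 else 0) := rfl
        have hcnt : (if i ∣ (k:Int) ∧ (i+1) * i ≤ (k:Int) ∧ (k:Int) < (PySem.Int.floordiv e i + 1) * i then (1:Nat) else 0)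
            = (if i ∣ (k:Int) ∧ i*i < (k:Int) then 1 else 0) := by
          congr 1
          simp only [eq_iff_iff]
          constructor
          · rintro ⟨hd, h1, _⟩; exact ⟨hd, by nlinarith⟩
          · rintro ⟨⟨t, ht⟩, h2⟩
            refine ⟨⟨t, ht⟩, ?_, ?_⟩
            · rw [ht] at h2 ⊢
              have hti : i < t := lt_of_mul_lt_mul_left h2 (by omega)
              have h5 := mul_le_mul_of_nonneg_right (show i+1 ≤ t by omega) (show (0:Int) ≤ i by omega)
              nlinarith
            · have hf : PySem.Int.floordiv e i < PySem.Int.floordiv e i + 1 := by omega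
              have hf2 := (PySem.Int.floordiv_lt_iff_lt_mul (by omega : (0:Int) < i)).mp hf
              omega
        rw [hcnt]
        push_cast
        split_ifs <;> ring
      · rw [pvFilterIccEmpty _ _ _ hik, pvFilterIccEmpty _ _ _ hik,
            pvFilterIccEmpty _ _ _ (by omega), pvFilterIccEmpty _ _ _ (by omega)]
        have h1 : ¬ ((i*i : Int) = (k:Int)) := by nlinarith
        have h2 : ¬ (i ∣ (k:Int) ∧ (i+1) * i ≤ (k:Int) ∧ (k:Int) < (PySem.Int.floordiv e i + 1) * i) := by
          rintro ⟨_, h2, _⟩; nlinarith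
        simp [h1, h2]
    · rw [bSieve, dif_neg hg]
      have hempty1 : (((Finset.Icc i (k:Int)).filter (fun m => m ∣ (k:Int) ∧ m*m < (k:Int))).card) = 0 := by
        rw [Finset.card_eq_zero, Finset.filter_eq_empty_iff]
        rintro m hm ⟨_, hmm⟩
        rw [Finset.mem_Icc] at hm
        nlinarith
      have hempty2 : (((Finset.Icc i (k:Int)).filter (fun m => m*m = (k:Int))).card) = 0 := by
        rw [Finset.card_eq_zero, Finset.filter_eq_empty_iff]
        intro m hm hmm
        rw [Finset.mem_Icc] at hm
        nlinarith
      rw [hempty1, hempty2]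
      simp

theorem pvPairing (k : Int) (hk : 0 ≤ k) :
    (((Finset.Icc 1 k).filter (fun m => m ∣ k)).card)
      = 2 * ((Finset.Icc 1 k).filter (fun m => m ∣ k ∧ m*m < k)).card
        + ((Finset.Icc 1 k).filter (fun m => m*m = k)).card := by
  rcases eq_or_lt_of_le hk with h0 | hpos
  · rw [Finset.Icc_eq_empty (by omega)]
    simp
  -- k ≥ 1.  Partition the divisors by comparing m*m with k.
  have hsq : ((Finset.Icc 1 k).filter (fun m => m*m = k))
      = ((Finset.Icc 1 k).filter (fun m => m ∣ k ∧ m*m = k)) := by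
    apply Finset.filter_congr
    intro m _
    constructor
    · intro h; exact ⟨Dvd.intro m (by linarith [h]), h⟩
    · intro h; exact h.2
  have hpart : ((Finset.Icc 1 k).filter (fun m => m ∣ k)).card
      = ((Finset.Icc 1 k).filter (fun m => m ∣ k ∧ m*m < k)).card
        + ((Finset.Icc 1 k).filter (fun m => m ∣ k ∧ m*m = k)).card
        + ((Finset.Icc 1 k).filter (fun m => m ∣ k ∧ k < m*m)).card := by
    rw [← Finset.card_union_of_disjoint, ← Finset.card_union_of_disjoint]
    · congr 1
      ext m
      simp only [Finset.mem_union, Finset.mem_filter, Finset.mem_Icc]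
      constructor
      · rintro ⟨hm, hd⟩
        rcases lt_trichotomy (m*m) k with h | h | h
        · exact Or.inl (Or.inl ⟨hm, hd, h⟩)
        · exact Or.inl (Or.inr ⟨hm, hd, h⟩)
        · exact Or.inr ⟨hm, hd, h⟩
      · rintro ((⟨hm, hd, _⟩ | ⟨hm, hd, _⟩) | ⟨hm, hd, _⟩) <;> exact ⟨hm, hd⟩
    · rw [Finset.disjoint_left]
      intro m hm hm'
      simp only [Finset.mem_union, Finset.mem_filter, Finset.mem_Icc] at hm hm'
      rcases hm with ⟨_, _, h⟩ | ⟨_, _, h⟩ <;> omega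
    · rw [Finset.disjoint_left]
      intro m hm hm'
      simp only [Finset.mem_filter, Finset.mem_Icc] at hm hm'
      omega
  have hCA : ((Finset.Icc 1 k).filter (fun m => m ∣ k ∧ k < m*m)).card
      = ((Finset.Icc 1 k).filter (fun m => m ∣ k ∧ m*m < k)).card := by
    refine Finset.card_nbij' (fun m => k / m) (fun m => k / m) ?_ ?_ ?_ ?_
    · intro m hm
      simp only [Finset.coe_filter, Finset.mem_Icc, Set.mem_setOf_eq] at hm ⊢
      obtain ⟨⟨hm1, hmk⟩, hd, hgt⟩ := hm
      have hmul : m * (k / m) = k := Int.mul_ediv_cancel' hd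
      set t := k / m with ht
      have ht1 : 1 ≤ t := by nlinarith
      have htk : t ≤ k := by nlinarith
      refine ⟨⟨ht1, htk⟩, Dvd.intro_left m hmul, ?_⟩
      have htm : t < m := by nlinarith
      nlinarith
    · intro m hm
      simp only [Finset.coe_filter, Finset.mem_Icc, Set.mem_setOf_eq] at hm ⊢
      obtain ⟨⟨hm1, hmk⟩, hd, hlt⟩ := hm
      have hmul : m * (k / m) = k := Int.mul_ediv_cancel' hd
      set t := k / m with ht
      have ht1 : 1 ≤ t := by nlinarith
      have htk : t ≤ k := by nlinarith
      refine ⟨⟨ht1, htk⟩, Dvd.intro_left m hmul, ?_⟩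
      have htm : m < t := by nlinarith
      nlinarith
    · intro m hm
      simp only [Finset.coe_filter, Finset.mem_Icc, Set.mem_setOf_eq] at hm
      obtain ⟨⟨hm1, hmk⟩, hd, _⟩ := hm
      obtain ⟨t, ht⟩ := hd
      have hm0 : m ≠ 0 := by omega
      have ht0 : t ≠ 0 := by intro h; rw [h, mul_zero] at ht; omega
      simp only
      rw [ht, Int.mul_ediv_cancel_left _ hm0, mul_comm, Int.mul_ediv_cancel_left _ ht0]
    · intro m hm
      simp only [Finset.coe_filter, Finset.mem_Icc, Set.mem_setOf_eq] at hm
      obtain ⟨⟨hm1, hmk⟩, hd, _⟩ := hm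
      obtain ⟨t, ht⟩ := hd
      have hm0 : m ≠ 0 := by omega
      have ht0 : t ≠ 0 := by intro h; rw [h, mul_zero] at ht; omega
      simp only
      rw [ht, Int.mul_ediv_cancel_left _ hm0, mul_comm, Int.mul_ediv_cancel_left _ ht0]
  rw [hsq, hpart, hCA]
  ring


-- B's suffix fold with a nonempty accumulator splits off the accumulator
theorem pvPassAcc (g : Int → Int) (l : List Int) : ∀ (acc : List Int) (c v : Int),
    (l.foldl (fun st s =>
        let cv := if st.2.1 ≤ g s then (g s, s) else (st.2.1, st.2.2)
        (st.1 ++ [cv.2], cv.1, cv.2)) (acc, c, v))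
      = (acc ++ (l.foldl (fun st s =>
        let cv := if st.2.1 ≤ g s then (g s, s) else (st.2.1, st.2.2)
        (st.1 ++ [cv.2], cv.1, cv.2)) ([], c, v)).1,
        (l.foldl (fun st s =>
        let cv := if st.2.1 ≤ g s then (g s, s) else (st.2.1, st.2.2)
        (st.1 ++ [cv.2], cv.1, cv.2)) ([], c, v)).2) := by
  induction l with
  | nil => intro acc c v; simp
  | cons s l ih =>
    intro acc c v
    simp only [List.foldl_cons]
    rw [ih]
    conv_rhs => rw [ih]
    simp

-- A's suffix pass writes exactly B's collected values (reversed) into positions 1..a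
theorem pvPass (g : Int → Int) : ∀ (n : Nat) (a : Int), a.toNat = n → 0 ≤ a →
    ∀ (T : List Int) (c v : Int), a < (T.length : Int) →
    (PySem.List.pyRange a 0 (-1)).foldl (fun st s =>
        let mcv := if st.2.1 ≤ g s then (g s, s) else (st.2.1, st.2.2)
        (PySem.List.pySetD st.1 s mcv.2, mcv.1, mcv.2)) (T, c, v)
      = (T.take 1 ++ ((PySem.List.pyRange a 0 (-1)).foldl (fun st s =>
            let cv := if st.2.1 ≤ g s then (g s, s) else (st.2.1, st.2.2)
            (st.1 ++ [cv.2], cv.1, cv.2)) ([], c, v)).1.reverse ++ T.drop (a.toNat + 1),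
         ((PySem.List.pyRange a 0 (-1)).foldl (fun st s =>
            let cv := if st.2.1 ≤ g s then (g s, s) else (st.2.1, st.2.2)
            (st.1 ++ [cv.2], cv.1, cv.2)) ([], c, v)).2) := by
  intro n
  induction n with
  | zero =>
    intro a ha h0 T c v hT
    have ha0 : a = 0 := by omega
    subst ha0
    rw [PySem.List.pyRange_neg_one_eq_nil le_rfl]
    simp only [List.foldl_nil, List.reverse_nil]
    conv_lhs => rw [← List.take_append_drop 1 T]
    simp
  | succ n ih =>
    intro a ha h0 T c v hT
    have ha1 : 0 < a := by omega
    rw [PySem.List.pyRange_neg_one_cons ha1]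
    simp only [List.foldl_cons]
    set cv := if c ≤ g a then (g a, a) else (c, v) with hcv
    have hsetT : PySem.List.pySetD T a cv.2 = T.set a.toNat cv.2 := by
      rcases cv with ⟨c', v'⟩
      exact PySem.List.pySetD_of_nonneg _ _ (by omega)
    rw [hsetT]
    rw [ih (a-1) (by omega) (by omega) _ _ _ (by simp; omega)]
    simp only [List.nil_append]
    rw [pvPassAcc g _ [cv.2]]
    have htake : (T.set a.toNat cv.2).take 1 = T.take 1 := by
      rw [List.take_set, List.set_eq_of_length_le (by simp [List.length_take]; omega)]
    have hdrop : (T.set a.toNat cv.2).drop ((a-1).toNat + 1) = cv.2 :: T.drop (a.toNat + 1) := by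
      have hlt : a.toNat < (T.set a.toNat cv.2).length := by simp; omega
      have h1 : (a-1).toNat + 1 = a.toNat := by omega
      rw [h1, List.drop_eq_getElem_cons hlt, List.getElem_set_self]
      rw [List.drop_set]
      simp
    rw [htake, hdrop]
    simp


theorem pvFoldSetLen (js : List Int) (g : Int → Int) (f : List Int → Int → Int) (d : List Int) :
    (js.foldl (fun d j => PySem.List.pySetD d (g j) (f d j)) d).length = d.length := by
  induction js generalizing d with
  | nil => rfl
  | cons j js ih => simp [List.foldl_cons, ih, PySem.List.length_pySetD]

theorem pvALen (e : Int) (is : List Int) (d : List Int) :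
    (is.foldl (fun d i =>
        (PySem.List.pyRange i (e+1) i).foldl
          (fun d j => PySem.List.pySetD d j (PySem.List.pyGetD d j 0 + 1)) d) d).length = d.length := by
  induction is generalizing d with
  | nil => rfl
  | cons i is ih =>
    rw [List.foldl_cons, ih, pvFoldSetLen]
  
theorem pvBLen (e : Int) : ∀ (n : Nat) (i : Int) (d : List Int), n = (e + 1 - i).toNat → 1 ≤ i →
    (bSieve e i d).length = d.length := by
  intro n
  induction n with
  | zero =>
    intro i d hn hi
    have hii : i ≤ i * i := by nlinarith [sq_nonneg (i-1)]
    have : ¬ (i * i ≤ e) := by omega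
    rw [bSieve, dif_neg this]
  | succ n ih =>
    intro i d hn hi
    by_cases hg : i * i ≤ e
    · rw [bSieve, dif_pos hg]
      have hie : i ≤ e := le_trans (by nlinarith) hg
      rw [ih (i+1) _ (by omega) (by omega), pvFoldSetLen, PySem.List.length_pySetD]
    · rw [bSieve, dif_neg hg]

-- the two sieves produce the same array
theorem pvSieveEq (e : Int) (he : 0 ≤ e) :
    (PySem.List.pyRange 1 (e+1) 1).foldl
      (fun dc i => (PySem.List.pyRange i (e+1) i).foldl
        (fun dc j => PySem.List.pySetD dc j (PySem.List.pyGetD dc j 0 + 1)) dc)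
      (List.replicate (e+1).toNat 0)
    = bSieve e 1 (List.replicate (e+1).toNat 0) := by
  apply List.ext_getElem
  · rw [pvALen, pvBLen e (e + 1 - 1).toNat 1 _ (by omega) le_rfl]
  · intro k h1 h2
    have hlenA : ((List.replicate (e+1).toNat (0:Int)).length : Int) = e + 1 := by simp; omega
    have hk : (k : Int) ≤ e := by
      rw [pvALen] at h1
      simp at h1
      omega
    rw [← List.getD_eq_getElem _ 0 h1, ← List.getD_eq_getElem _ 0 h2]
    rw [pvAEntry e k hk]
    rw [pvBEntry e k hk (e + 1 - 1).toNat 1 _ le_rfl (by omega) (by omega)]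
    rw [List.getD_replicate _ (by rw [pvALen] at h1; simpa using h1)]
    rw [pvPairing (k:Int) (by omega)]
    push_cast
    ring

-- ===== VERDICT (by name: the statement is the Claim_ definition above) =====
theorem solution_spec : Claim_equal_solution := by
  intro e starts _ hpre
  unfold Spec_solution
  by_cases he : 0 ≤ e
  · simp only [solution, solution_alt]
    rw [← pvSieveEq e he]
    rw [pvPass _ e.toNat e rfl he _ 0 0 (by simp)]
    rw [PySem.List.foldl_append_singleton_eq_map]
    have ht : List.take 1 (List.replicate (e+1).toNat (0:Int)) = [0] := by
      rw [List.take_replicate, show min 1 (e+1).toNat = 1 by omega]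
      simp
    have hd : List.drop (e.toNat + 1) (List.replicate (e+1).toNat (0:Int)) = [] := by
      rw [List.drop_replicate, show (e+1).toNat - (e.toNat + 1) = 0 by omega]
      simp
    rw [ht, hd]
    simp
  · have hs : starts = [] := by
      cases starts with
      | nil => rfl
      | cons s ss =>
        exfalso
        obtain ⟨hp1, hp2⟩ := hpre s (List.mem_cons_self ..)
        omega
    subst hs
    simp [solution, solution_alt]
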